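-- pv_equiv track=rewrite | github.com/zhang-1048/event_extraction | exter_functions.py | match_keyword_cls
-- ===== SOURCE A (Python) =====
-- def match_keyword_cls(strage, enterprise, operators, filter_first):
--     """
--     strage:List,
--     enterprise:List,
--     operators:List,
--     return：List，
--     """
--     strage_list = []
--     enterprise_list = []
--     operators_list = []
--     other_list = []
--     res_dict = {}
--     total = [strage, enterprise, operators]
--     c = 0
--     for k, v in filter_first.items():
--         for i in v:
--             mark = 0
--             for j in strage:
--                 if j in i:
--                     strage_list.append((k, i))
--                     mark = 1
--                     break
--             if mark == 1: continue
--             for j in operators: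
--                 if j in i:
--                     operators_list.append((k, i))
--                     mark = 1
--                     break
--             if mark == 1: continue
--             for j in enterprise:
--                 if j in i:
--                     enterprise_list.append((k, i))
--                     mark = 1
--                     break
--             if mark == 1: continue
--             if mark == 0:
--                 other_list.append((k, i))
--
--     zonghe_list = [strage_list, operators_list, enterprise_list, other_list]
--     name_zonghe_list = ["lei1", "lei2", "lei3", "lei4"]
--
--     return zonghe_list, name_zonghe_list
-- ===== SOURCE B (Python) =====
-- def match_keyword_cls(strage, enterprise, operators, filter_first):
--     # Build a keyword -> priority index once (lower = higher priority; later
--     # overwrites win, so writing enterprise, then operators, then strage makes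
--     # the stored value the minimum priority of the keyword), then classify each
--     # string by scanning its own substrings (up to the longest keyword) against
--     # that index -- the per-string loop over the keyword lists disappears.
--     prio = {}
--     for kw in enterprise:
--         prio[kw] = 2
--     for kw in operators:
--         prio[kw] = 1
--     for kw in strage:
--         prio[kw] = 0
--     maxlen = 0
--     for kw in strage + operators + enterprise:
--         maxlen = max(maxlen, len(kw))
--     buckets = ([], [], [], [])
--     for k, v in filter_first.items():
--         for s in v:
--             best = 3
--             for a in range(len(s) + 1):
--                 for n in range(min(maxlen, len(s) - a) + 1):
--                     best = min(best, prio.get(s[a:a + n], 3))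
--             buckets[best].append((k, s))
--     return list(buckets), ["lei1", "lei2", "lei3", "lei4"]
-- ===== Notes on version B (the rewrite author's own statement) =====
-- stated objective: alternative
-- what changed: A scans every keyword of three lists over each string with break/continue control flow; B builds a keyword->priority dict once (later overwrites realise the min priority) and classifies each string by looking up its own substrings (bounded by the longest keyword) in that index, so the per-string scans over the keyword lists disappear.
import Mathlib
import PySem

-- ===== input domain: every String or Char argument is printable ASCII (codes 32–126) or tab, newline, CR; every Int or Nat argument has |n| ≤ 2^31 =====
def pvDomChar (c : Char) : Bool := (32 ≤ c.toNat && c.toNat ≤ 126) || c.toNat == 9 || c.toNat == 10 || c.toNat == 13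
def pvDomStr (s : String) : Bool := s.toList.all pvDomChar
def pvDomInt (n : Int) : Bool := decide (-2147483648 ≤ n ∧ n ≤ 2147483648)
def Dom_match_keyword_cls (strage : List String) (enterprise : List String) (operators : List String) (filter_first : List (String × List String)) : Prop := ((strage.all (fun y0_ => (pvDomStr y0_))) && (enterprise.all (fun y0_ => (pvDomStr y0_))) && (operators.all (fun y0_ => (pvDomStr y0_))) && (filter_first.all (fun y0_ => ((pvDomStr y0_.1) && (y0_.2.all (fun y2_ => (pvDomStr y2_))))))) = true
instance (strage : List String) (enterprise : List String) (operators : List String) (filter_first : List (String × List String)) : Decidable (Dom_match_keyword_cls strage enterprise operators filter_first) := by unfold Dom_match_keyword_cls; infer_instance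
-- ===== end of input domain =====

-- B replaces A's per-string scans over the three keyword lists by a keyword->priority
-- dict built once (later overwrites realise the minimum priority) and a scan of each
-- string's own substrings, bounded by the longest keyword, looked up in that dict
-- (objective: alternative).


-- ===== PORT A =====
-- A: one pass over the dict items, threading four accumulator lists (mark/continue
-- via first-match if-chain; the three keyword loops with break are the .any tests).
def pvStepA (strage : List String) (enterprise : List String) (operators : List String)
    (acc : List (String × String) × List (String × String) × List (String × String) × List (String × String))
    (p : String × String) :
    List (String × String) × List (String × String) × List (String × String) × List (String × String) :=
  if strage.any (fun j => PySem.Str.isIn j p.2) then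
    (acc.1 ++ [p], acc.2.1, acc.2.2.1, acc.2.2.2)
  else if operators.any (fun j => PySem.Str.isIn j p.2) then
    (acc.1, acc.2.1 ++ [p], acc.2.2.1, acc.2.2.2)
  else if enterprise.any (fun j => PySem.Str.isIn j p.2) then
    (acc.1, acc.2.1, acc.2.2.1 ++ [p], acc.2.2.2)
  else
    (acc.1, acc.2.1, acc.2.2.1, acc.2.2.2 ++ [p])

def match_keyword_cls (strage : List String) (enterprise : List String) (operators : List String) (filter_first : List (String × List String)) : (List (List (String × String))) × List String :=
  let st := (PySem.Dict.ofList filter_first).items.foldl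
    (fun acc kv => kv.2.foldl (fun acc i => pvStepA strage enterprise operators acc (kv.1, i)) acc)
    ([], [], [], [])
  ([st.1, st.2.1, st.2.2.1, st.2.2.2], ["lei1", "lei2", "lei3", "lei4"])

-- ===== PORT B =====
-- B: keyword -> priority dict (enterprise 2, operators 1, strage 0; later overwrites win).
def pvPrio (strage : List String) (enterprise : List String) (operators : List String) : PySem.Dict String Int :=
  let d := enterprise.foldl (fun d kw => d.insert kw 2) PySem.Dict.empty
  let d := operators.foldl (fun d kw => d.insert kw 1) d
  strage.foldl (fun d kw => d.insert kw 0) d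

-- maxlen = 0; for kw in strage + operators + enterprise: maxlen = max(maxlen, len(kw))
def pvMaxlen (strage : List String) (enterprise : List String) (operators : List String) : Int :=
  (strage ++ operators ++ enterprise).foldl (fun m kw => max m (PySem.Str.len kw)) 0

-- best = 3; for a in range(len(s)+1): for n in range(min(maxlen, len(s)-a)+1):
--   best = min(best, prio.get(s[a:a+n], 3))
def pvBest (prio : PySem.Dict String Int) (maxlen : Int) (s : String) : Int :=
  (PySem.List.pyRange 0 (PySem.Str.len s + 1) 1).foldl (fun best a =>
    (PySem.List.pyRange 0 (min maxlen (PySem.Str.len s - a) + 1) 1).foldl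
      (fun best n => min best (prio.getD (PySem.Str.slice s (some a) (some (a + n))) 3)) best) 3

-- buckets[best].append((k, s))
def pvStepB (prio : PySem.Dict String Int) (maxlen : Int)
    (acc : List (String × String) × List (String × String) × List (String × String) × List (String × String))
    (p : String × String) :
    List (String × String) × List (String × String) × List (String × String) × List (String × String) :=
  let best := pvBest prio maxlen p.2
  if best = 0 then (acc.1 ++ [p], acc.2.1, acc.2.2.1, acc.2.2.2)
  else if best = 1 then (acc.1, acc.2.1 ++ [p], acc.2.2.1, acc.2.2.2)
  else if best = 2 then (acc.1, acc.2.1, acc.2.2.1 ++ [p], acc.2.2.2)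
  else (acc.1, acc.2.1, acc.2.2.1, acc.2.2.2 ++ [p])

def match_keyword_cls_alt (strage : List String) (enterprise : List String) (operators : List String) (filter_first : List (String × List String)) : (List (List (String × String))) × List String :=
  let prio := pvPrio strage enterprise operators
  let maxlen := pvMaxlen strage enterprise operators
  let st := (PySem.Dict.ofList filter_first).items.foldl
    (fun acc kv => kv.2.foldl (fun acc i => pvStepB prio maxlen acc (kv.1, i)) acc)
    ([], [], [], [])
  ([st.1, st.2.1, st.2.2.1, st.2.2.2], ["lei1", "lei2", "lei3", "lei4"])

-- ===== PRECONDITION & SPEC =====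
def Spec_match_keyword_cls (strage : List String) (enterprise : List String) (operators : List String) (filter_first : List (String × List String)) (out : (List (List (String × String))) × List String) : Prop := out = match_keyword_cls_alt strage enterprise operators filter_first
instance (strage : List String) (enterprise : List String) (operators : List String) (filter_first : List (String × List String)) (out : (List (List (String × String))) × List String) : Decidable (Spec_match_keyword_cls strage enterprise operators filter_first out) := by unfold Spec_match_keyword_cls; infer_instance

-- ===== CLAIM (what is proved, stated in full; the proofs are below) =====
def Claim_equal_match_keyword_cls : Prop := ∀ (strage : List String) (enterprise : List String) (operators : List String) (filter_first : List (String × List String)), Dom_match_keyword_cls strage enterprise operators filter_first → Spec_match_keyword_cls strage enterprise operators filter_first (match_keyword_cls strage enterprise operators filter_first)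

-- ===== LEMMAS AND PROOFS =====

-- a loop of inserts with one constant value: lookup afterwards
theorem pv_getD_foldl_insert_const (l : List String) (c : Int) (d : PySem.Dict String Int) (k : String) (d0 : Int) :
    (l.foldl (fun d kw => d.insert kw c) d).getD k d0 = if k ∈ l then c else d.getD k d0 := by
  induction l generalizing d with
  | nil => simp
  | cons kw rest ih =>
    simp only [List.foldl_cons, ih, PySem.Dict.getD_insert, List.mem_cons]
    by_cases h1 : k ∈ rest <;> by_cases h2 : k = kw <;> simp [h1, h2]

-- the priority dict stores the first-match priority of A's chain
theorem pv_prio_getD (strage enterprise operators : List String) (k : String) :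
    (pvPrio strage enterprise operators).getD k 3 =
      if k ∈ strage then 0 else if k ∈ operators then 1 else if k ∈ enterprise then 2 else 3 := by
  simp [pvPrio, pv_getD_foldl_insert_const]

theorem pv_foldl_min_le {α : Type} (l : List α) (f : α → Int) (b0 : Int) :
    l.foldl (fun b x => min b (f x)) b0 ≤ b0 ∧ ∀ x ∈ l, l.foldl (fun b x => min b (f x)) b0 ≤ f x := by
  induction l generalizing b0 with
  | nil => simp
  | cons y rest ih =>
    refine ⟨le_trans (ih (min b0 (f y))).1 (by simp), ?_⟩
    intro x hx
    rcases List.mem_cons.mp hx with h | h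
    · subst h; exact le_trans (ih (min b0 (f x))).1 (by simp)
    · exact (ih (min b0 (f y))).2 x h

theorem pv_le_foldl_min {α : Type} (l : List α) (f : α → Int) (c : Int) :
    ∀ b0, c ≤ b0 → (∀ x ∈ l, c ≤ f x) → c ≤ l.foldl (fun b x => min b (f x)) b0 := by
  induction l with
  | nil => intro b0 h0 _; exact h0
  | cons y rest ih =>
    intro b0 h0 h
    exact ih (min b0 (f y)) (le_min h0 (h y List.mem_cons_self))
      (fun x hx => h x (List.mem_cons_of_mem y hx))

-- a nested fold is a fold over the flattened pair list
theorem pv_foldl_nested_pairs {α β γ : Type} (l : List α) (g : α → List β) (h : γ → α × β → γ) (init : γ) :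
    l.foldl (fun b a => (g a).foldl (fun b n => h b (a, n)) b) init
      = (l.flatMap (fun a => (g a).map (fun n => (a, n)))).foldl h init := by
  induction l generalizing init with
  | nil => simp
  | cons a rest ih => simp [List.foldl_append, List.foldl_map, ih]

-- pvBest as a single fold over the flattened (a, n) pairs
theorem pvBest_eq_flat (prio : PySem.Dict String Int) (maxlen : Int) (s : String) :
    pvBest prio maxlen s =
      ((PySem.List.pyRange 0 (PySem.Str.len s + 1) 1).flatMap
        (fun a => (PySem.List.pyRange 0 (min maxlen (PySem.Str.len s - a) + 1) 1).map
          (fun n => (a, n)))).foldl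
        (fun b p => min b (prio.getD (PySem.Str.slice s (some p.1) (some (p.1 + p.2))) 3)) 3 := by
  unfold pvBest
  exact pv_foldl_nested_pairs (PySem.List.pyRange 0 (PySem.Str.len s + 1) 1)
    (fun a => PySem.List.pyRange 0 (min maxlen (PySem.Str.len s - a) + 1) 1)
    (fun b p => min b (prio.getD (PySem.Str.slice s (some p.1) (some (p.1 + p.2))) 3)) 3

-- any nonnegative slice s[a:a+n] occurs in s
theorem pv_slice_isIn (s : String) (a n : Int) (ha : 0 ≤ a) (hn : 0 ≤ n) :
    PySem.Str.isIn (PySem.Str.slice s (some a) (some (a + n))) s = true := by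
  rw [PySem.Str.isIn_iff_infix, PySem.Str.toList_slice, PySem.Chars.slice_eq_listSlice,
    PySem.List.slice_toNat s.toList ha (by omega)]
  exact ((List.take_prefix _ _).isInfix).trans ((List.drop_suffix _ _).isInfix)

-- the keyword index scan over a string's substrings computes A's first-match tag
theorem pv_best_eq_tag (strage enterprise operators : List String) (s : String) :
    pvBest (pvPrio strage enterprise operators) (pvMaxlen strage enterprise operators) s =
      (if strage.any (fun j => PySem.Str.isIn j s) then 0
       else if operators.any (fun j => PySem.Str.isIn j s) then 1
       else if enterprise.any (fun j => PySem.Str.isIn j s) then 2 else 3) := by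
  have hml := PySem.List.le_foldl_max_int (strage ++ operators ++ enterprise) PySem.Str.len 0
  rw [pvBest_eq_flat]
  set P := (PySem.List.pyRange 0 (PySem.Str.len s + 1) 1).flatMap
    (fun a => (PySem.List.pyRange 0 (min (pvMaxlen strage enterprise operators) (PySem.Str.len s - a) + 1) 1).map
      (fun n => (a, n))) with hP
  -- every keyword occurring in s is reached as a slice at some pair of P
  have hreach : ∀ kw : String, kw ∈ strage ++ operators ++ enterprise →
      PySem.Str.isIn kw s = true →
      ∃ p ∈ P, PySem.Str.slice s (some p.1) (some (p.1 + p.2)) = kw := by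
    intro kw hmem hin
    obtain ⟨pre, suf, hps⟩ := (PySem.Str.isIn_iff_infix kw s).mp hin
    have hlen : pre.length + kw.toList.length + suf.length = s.toList.length := by
      rw [← hps]; simp only [List.length_append]
    have hkw : PySem.Str.len kw ≤ pvMaxlen strage enterprise operators := hml.2 kw hmem
    rw [PySem.Str.len_eq] at hkw
    refine ⟨((pre.length : Int), (kw.toList.length : Int)), ?_, ?_⟩
    · rw [hP]
      refine List.mem_flatMap.mpr ⟨(pre.length : Int), ?_, List.mem_map.mpr ⟨_, ?_, rfl⟩⟩
      · rw [PySem.List.mem_pyRange_one, PySem.Str.len_eq]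
        constructor
        · positivity
        · omega
      · rw [PySem.List.mem_pyRange_one, PySem.Str.len_eq]
        refine ⟨by positivity, ?_⟩
        omega
    · apply String.toList_inj.mp
      rw [PySem.Str.toList_slice, PySem.Chars.slice_eq_listSlice]
      rw [show ((pre.length : Int) + (kw.toList.length : Int)) = ((pre.length + kw.toList.length : Nat) : Int) by push_cast; ring]
      rw [PySem.List.slice_toNat s.toList (by positivity) (by positivity)]
      rw [Int.toNat_natCast, Int.toNat_natCast, Nat.add_sub_cancel_left, ← hps]
      rw [show pre ++ kw.toList ++ suf = pre ++ (kw.toList ++ suf) by simp]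
      rw [List.drop_left, List.take_left]
  -- every pair in P has nonnegative components
  have hPpos : ∀ p ∈ P, 0 ≤ p.1 ∧ 0 ≤ p.2 := by
    intro p hp
    rw [hP] at hp
    obtain ⟨a, ha, hm⟩ := List.mem_flatMap.mp hp
    obtain ⟨n, hn, rfl⟩ := List.mem_map.mp hm
    exact ⟨(PySem.List.mem_pyRange_one.mp ha).1, (PySem.List.mem_pyRange_one.mp hn).1⟩
  apply le_antisymm
  · -- fold ≤ chain: use the reached keyword's pair as the witness
    by_cases hS : strage.any (fun j => PySem.Str.isIn j s) = true
    · obtain ⟨kw, hkm, hki⟩ := List.any_eq_true.mp hS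
      obtain ⟨p, hp, hsl⟩ := hreach kw (by simp [hkm]) hki
      have hFp : (pvPrio strage enterprise operators).getD
          (PySem.Str.slice s (some p.1) (some (p.1 + p.2))) 3 = 0 := by
        rw [hsl, pv_prio_getD, if_pos hkm]
      have hb := (pv_foldl_min_le P (fun p : Int × Int =>
        (pvPrio strage enterprise operators).getD (PySem.Str.slice s (some p.1) (some (p.1 + p.2))) 3) 3).2 p hp
      rw [if_pos hS]
      exact hb.trans (le_of_eq hFp)
    · by_cases hO : operators.any (fun j => PySem.Str.isIn j s) = true
      · obtain ⟨kw, hkm, hki⟩ := List.any_eq_true.mp hO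
        obtain ⟨p, hp, hsl⟩ := hreach kw (by simp [hkm]) hki
        have hks : kw ∉ strage := fun hc => hS (List.any_eq_true.mpr ⟨kw, hc, hki⟩)
        have hFp : (pvPrio strage enterprise operators).getD
            (PySem.Str.slice s (some p.1) (some (p.1 + p.2))) 3 = 1 := by
          rw [hsl, pv_prio_getD, if_neg hks, if_pos hkm]
        have hb := (pv_foldl_min_le P (fun p : Int × Int =>
          (pvPrio strage enterprise operators).getD (PySem.Str.slice s (some p.1) (some (p.1 + p.2))) 3) 3).2 p hp
        rw [if_neg hS, if_pos hO]
        exact hb.trans (le_of_eq hFp)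
      · by_cases hE : enterprise.any (fun j => PySem.Str.isIn j s) = true
        · obtain ⟨kw, hkm, hki⟩ := List.any_eq_true.mp hE
          obtain ⟨p, hp, hsl⟩ := hreach kw (by simp [hkm]) hki
          have hks : kw ∉ strage := fun hc => hS (List.any_eq_true.mpr ⟨kw, hc, hki⟩)
          have hko : kw ∉ operators := fun hc => hO (List.any_eq_true.mpr ⟨kw, hc, hki⟩)
          have hFp : (pvPrio strage enterprise operators).getD
              (PySem.Str.slice s (some p.1) (some (p.1 + p.2))) 3 = 2 := by
            rw [hsl, pv_prio_getD, if_neg hks, if_neg hko, if_pos hkm]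
          have hb := (pv_foldl_min_le P (fun p : Int × Int =>
            (pvPrio strage enterprise operators).getD (PySem.Str.slice s (some p.1) (some (p.1 + p.2))) 3) 3).2 p hp
          rw [if_neg hS, if_neg hO, if_pos hE]
          exact hb.trans (le_of_eq hFp)
        · rw [if_neg hS, if_neg hO, if_neg hE]
          exact (pv_foldl_min_le P (fun p : Int × Int =>
            (pvPrio strage enterprise operators).getD (PySem.Str.slice s (some p.1) (some (p.1 + p.2))) 3) 3).1
  · -- chain ≤ fold: the chain value bounds every looked-up slice priority
    refine pv_le_foldl_min P (fun p : Int × Int =>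
      (pvPrio strage enterprise operators).getD (PySem.Str.slice s (some p.1) (some (p.1 + p.2))) 3) _ 3
      (by split_ifs <;> omega) ?_
    intro p hp
    obtain ⟨hp1, hp2⟩ := hPpos p hp
    have hin := pv_slice_isIn s p.1 p.2 hp1 hp2
    simp only [pv_prio_getD]
    set sub := PySem.Str.slice s (some p.1) (some (p.1 + p.2)) with hsub
    by_cases c1 : sub ∈ strage
    · have hS : strage.any (fun j => PySem.Str.isIn j s) = true := List.any_eq_true.mpr ⟨sub, c1, hin⟩
      rw [if_pos hS, if_pos c1]
    · rw [if_neg c1]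
      by_cases c2 : sub ∈ operators
      · have hO : operators.any (fun j => PySem.Str.isIn j s) = true := List.any_eq_true.mpr ⟨sub, c2, hin⟩
        rw [if_pos c2]
        by_cases hSb : strage.any (fun j => PySem.Str.isIn j s) = true
        · rw [if_pos hSb]; omega
        · rw [if_neg hSb, if_pos hO]
      · rw [if_neg c2]
        by_cases c3 : sub ∈ enterprise
        · have hE : enterprise.any (fun j => PySem.Str.isIn j s) = true := List.any_eq_true.mpr ⟨sub, c3, hin⟩
          rw [if_pos c3]
          by_cases hSb : strage.any (fun j => PySem.Str.isIn j s) = true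
          · rw [if_pos hSb]; omega
          · rw [if_neg hSb]
            by_cases hOb : operators.any (fun j => PySem.Str.isIn j s) = true
            · rw [if_pos hOb]; omega
            · rw [if_neg hOb, if_pos hE]
        · rw [if_neg c3]
          split_ifs <;> omega

-- with best = the first-match tag, B's bucket step is A's if-chain step
theorem pv_step_eq (strage enterprise operators : List String)
    (acc : List (String × String) × List (String × String) × List (String × String) × List (String × String))
    (p : String × String) :
    pvStepB (pvPrio strage enterprise operators) (pvMaxlen strage enterprise operators) acc p
      = pvStepA strage enterprise operators acc p := by
  unfold pvStepB pvStepA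
  rw [pv_best_eq_tag]
  split_ifs <;> simp_all

-- ===== VERDICT (by name: the statement is the Claim_ definition above) =====
theorem match_keyword_cls_spec : Claim_equal_match_keyword_cls := by
  intro strage enterprise operators filter_first _
  unfold Spec_match_keyword_cls match_keyword_cls match_keyword_cls_alt
  simp only [pv_step_eq]
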